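-- pv_equiv track=rewrite | github.com/miquido/draive | src/draive/multimodal/tags.py | _escaped_attributes
-- ===== SOURCE A (Python) =====
-- def _escaped_attributes(
--     attributes: list[tuple[str, str]],
--     /,
-- ) -> str:
--     return (
--         (
--             " "
--             + " ".join(f'{key}="{_escape_tag_attribute_value(value)}"' for key, value in attributes)
--         )
--         if attributes
--         else ""
--     )
--
-- def _escape_tag_attribute_value(
--     value: str,
--     /,
-- ) -> str:
--     accumulator: list[str] = []
--     for char in value:
--         match char:
--             case "\n":
--                 accumulator.append("\\n")
--
--             case "\t":
--                 accumulator.append("\\t")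
--
--             case "\r":
--                 accumulator.append("\\r")
--
--             case '"':
--                 accumulator.append('\\"')
--
--             case "\\":
--                 accumulator.append("\\\\")
--
--             case other:
--                 accumulator.append(other)
--
--     return "".join(accumulator)
-- ===== SOURCE B (Python) =====
-- def _escape_tag_attribute_value(value, /):
--     # backslash first, so backslashes introduced by the later replacements stay untouched
--     return (
--         value.replace("\\", "\\\\")
--         .replace("\n", "\\n")
--         .replace("\t", "\\t")
--         .replace("\r", "\\r")
--         .replace('"', '\\"')
--     )
--
--
-- def _escaped_attributes(attributes, /):
--     # prefix each rendered attribute with its separating space: no guard needed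
--     return "".join(
--         f' {key}="{_escape_tag_attribute_value(value)}"' for key, value in attributes
--     )
-- ===== Notes on version B (the rewrite author's own statement) =====
-- stated objective: idiomatic
-- what changed: Replaced the per-character match/accumulate escaping loop with five chained str.replace passes (backslash first so later replacements cannot re-escape), and removed the non-empty guard by prefixing each joined item with its own leading space.
import Mathlib
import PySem

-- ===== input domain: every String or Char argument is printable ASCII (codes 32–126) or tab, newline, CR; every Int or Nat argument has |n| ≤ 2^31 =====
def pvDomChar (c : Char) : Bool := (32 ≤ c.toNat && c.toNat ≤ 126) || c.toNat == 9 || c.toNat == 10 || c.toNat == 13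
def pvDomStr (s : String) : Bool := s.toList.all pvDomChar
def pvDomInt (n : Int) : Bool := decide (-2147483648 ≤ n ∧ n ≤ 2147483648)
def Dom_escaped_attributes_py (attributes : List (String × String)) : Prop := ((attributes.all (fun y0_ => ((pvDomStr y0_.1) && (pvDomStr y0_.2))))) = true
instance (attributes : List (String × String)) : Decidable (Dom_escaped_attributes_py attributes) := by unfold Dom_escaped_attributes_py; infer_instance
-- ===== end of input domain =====

-- B escapes by five chained str.replace passes (backslash first) instead of A's per-character
-- match/accumulate loop, and joins one space-prefixed item per pair instead of guard-plus-" ".join (idiomatic).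

-- ===== PORT A =====
-- per-character escape, branch order as in A's match
def escACharA (c : Char) : List Char :=
  match c with
  | '\n' => ['\\', 'n']
  | '\t' => ['\\', 't']
  | '\r' => ['\\', 'r']
  | '"'  => ['\\', '"']
  | '\\' => ['\\', '\\']
  | other => [other]

-- _escape_tag_attribute_value: accumulate escaped pieces, then "".join
def escTagValueA (value : List Char) : List Char :=
  PySem.Chars.join [] (value.foldl (fun acc c => acc ++ [escACharA c]) [])

def escaped_attributes_py (attributes : List (String × String)) : String :=
  match attributes with
  | [] => ""
  | _ =>
    String.mk (' ' :: PySem.Chars.join [' ']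
      (attributes.map (fun kv =>
        kv.1.toList ++ ['=', '"'] ++ escTagValueA kv.2.toList ++ ['"'])))

-- ===== PORT B =====
-- five chained replaces, backslash first
def escTagValueB (value : List Char) : List Char :=
  PySem.Chars.replace
    (PySem.Chars.replace
      (PySem.Chars.replace
        (PySem.Chars.replace
          (PySem.Chars.replace value ['\\'] ['\\', '\\'])
          ['\n'] ['\\', 'n'])
        ['\t'] ['\\', 't'])
      ['\r'] ['\\', 'r'])
    ['"'] ['\\', '"']

def escaped_attributes_py_alt (attributes : List (String × String)) : String :=
  String.mk (PySem.Chars.join []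
    (attributes.map (fun kv =>
      ' ' :: kv.1.toList ++ ['=', '"'] ++ escTagValueB kv.2.toList ++ ['"'])))

-- ===== PRECONDITION & SPEC =====
def Spec_escaped_attributes_py (attributes : List (String × String)) (out : String) : Prop := out = escaped_attributes_py_alt attributes
instance (attributes : List (String × String)) (out : String) : Decidable (Spec_escaped_attributes_py attributes out) := by unfold Spec_escaped_attributes_py; infer_instance

-- ===== CLAIM (what is proved, stated in full; the proofs are below) =====
def Claim_equal_escaped_attributes_py : Prop := ∀ (attributes : List (String × String)), Dom_escaped_attributes_py attributes → Spec_escaped_attributes_py attributes (escaped_attributes_py attributes)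

-- ===== LEMMAS AND PROOFS =====

-- replace with a single-character pattern is a per-character flatMap
theorem replace_go_single (c : Char) (new : List Char) :
    ∀ (fuel : Nat) (l acc : List Char), l.length ≤ fuel →
      PySem.Chars.replace.go [c] new fuel l acc =
        acc.reverse ++ l.flatMap (fun x => if x = c then new else [x]) := by
  intro fuel
  induction fuel with
  | zero =>
    intro l acc h
    have : l = [] := List.length_eq_zero_iff.mp (Nat.le_zero.mp h)
    subst this
    simp [PySem.Chars.replace.go]
  | succ n ih =>
    intro l acc h
    cases l with
    | nil => simp [PySem.Chars.replace.go]
    | cons x t =>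
      rw [PySem.Chars.replace.go]
      by_cases hx : x = c
      · subst hx
        have hp : [x].isPrefixOf (x :: t) = true := by simp [List.isPrefixOf]
        rw [if_pos hp]
        rw [ih _ _ (by simpa using Nat.le_of_succ_le_succ h)]
        simp
      · have hp : [c].isPrefixOf (x :: t) = false := by
          simp [List.isPrefixOf]
          exact fun hc => (hx hc.symm).elim
        rw [hp]
        simp only [Bool.false_eq_true, if_false]
        rw [ih _ _ (by simpa using Nat.le_of_succ_le_succ h)]
        simp [hx]

theorem replace_single (s : List Char) (c : Char) (new : List Char) :
    PySem.Chars.replace s [c] new = s.flatMap (fun x => if x = c then new else [x]) := by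
  rw [PySem.Chars.replace]
  simp only [List.isEmpty_cons, Bool.false_eq_true, if_false]
  simpa using replace_go_single c new s.length s [] (le_refl _)

-- joining empty separators is flattening
theorem flatten_intersperse_nil {α : Type} (l : List (List α)) :
    (List.intersperse [] l).flatten = l.flatten := by
  induction l with
  | nil => rfl
  | cons x t ih =>
    cases t with
    | nil => rfl
    | cons y u => simp only [List.intersperse_cons₂, List.flatten_cons] at *; simp [ih]

-- the five chained replaces equal A's per-character escape
theorem escTagValue_eq (value : List Char) : escTagValueB value = value.flatMap escACharA := by
  unfold escTagValueB
  simp only [replace_single]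
  induction value with
  | nil => rfl
  | cons x t ih =>
    simp only [List.flatMap_cons, List.flatMap_append, ih]
    congr 1
    by_cases h1 : x = '\\'
    · subst h1; decide
    by_cases h2 : x = '\n'
    · subst h2; decide
    by_cases h3 : x = '\t'
    · subst h3; decide
    by_cases h4 : x = '\r'
    · subst h4; decide
    by_cases h5 : x = '"'
    · subst h5; decide
    simp only [List.flatMap_cons, List.flatMap_nil, if_neg h1, if_neg h2, if_neg h3,
      if_neg h4, if_neg h5, List.append_nil]
    have hx : escACharA x = [x] := by
      rw [escACharA.eq_def]
      split <;> simp_all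
    simp [hx]

theorem escTagValueA_eq (value : List Char) : escTagValueA value = value.flatMap escACharA := by
  unfold escTagValueA
  rw [PySem.List.foldl_append_singleton_eq_map]
  simp [PySem.Chars.join, List.intercalate, List.flatMap, flatten_intersperse_nil]

-- joining space-prefixed items equals a leading space plus a " "-join, for nonempty lists
theorem join_space_prefix (g : (String × String) → List Char) (x : String × String)
    (l : List (String × String)) :
    PySem.Chars.join [] ((x :: l).map (fun kv => ' ' :: g kv)) =
      ' ' :: PySem.Chars.join [' '] ((x :: l).map g) := by
  induction l generalizing x with
  | nil => simp [PySem.Chars.join, List.intercalate]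
  | cons y t ih =>
    simp only [List.map_cons, PySem.Chars.join, List.intercalate] at *
    simp only [List.intersperse_cons₂, List.flatten_cons] at *
    simp [ih y]

-- ===== VERDICT (by name: the statement is the Claim_ definition above) =====
theorem escaped_attributes_py_spec : Claim_equal_escaped_attributes_py := by
  intro attributes _
  unfold Spec_escaped_attributes_py escaped_attributes_py escaped_attributes_py_alt
  cases attributes with
  | nil => rfl
  | cons x l =>
    simp only
    rw [show (fun kv : String × String => ' ' :: kv.1.toList ++ ['=', '"'] ++ escTagValueB kv.2.toList ++ ['"'])
        = (fun kv => ' ' :: (kv.1.toList ++ ['=', '"'] ++ escTagValueA kv.2.toList ++ ['"'])) from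
      funext fun kv => by simp [escTagValue_eq, escTagValueA_eq]]
    rw [join_space_prefix (fun kv => kv.1.toList ++ ['=', '"'] ++ escTagValueA kv.2.toList ++ ['"']) x l]
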